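-- pv_equiv track=rewrite | github.com/gikf/advent-of-code | advent-of-code-2015/day 14/main.py | fly_for
-- ===== SOURCE A (Python) =====
-- def fly_for(time_limit, reindeers):
--     """Calculate distance traveled by each reindeer in time_limit."""
--     distances = []
--     for reindeer, (speed, duration, rest) in reindeers.items():
--         total_time = duration + rest
--         full_cycles = time_limit // total_time
--         distance_in_full_cycles = speed * duration * full_cycles
--
--         time_rest = time_limit - full_cycles * total_time
--         if time_rest > duration:
--             time_rest = duration
--
--         additional_distance = speed * time_rest
--         total_distance = distance_in_full_cycles + additional_distance
--         distances.append((reindeer, total_distance))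
--     return distances
-- ===== SOURCE B (Python) =====
-- def fly_for(time_limit, reindeers):
--     """Calculate distance traveled by each reindeer in time_limit."""
--     distances = []
--     for reindeer, (speed, duration, rest) in reindeers.items():
--         cycle = duration + rest
--         remaining = time_limit
--         distance = 0
--         # peel off whole fly+rest cycles in power-of-two chunks (no division)
--         while remaining >= cycle:
--             chunk = cycle
--             gain = speed * duration
--             while chunk * 2 <= remaining:
--                 chunk *= 2
--                 gain *= 2
--             remaining -= chunk
--             distance += gain
--         # partial final cycle: fly for at most `duration` of the leftover seconds
--         distance += speed * min(remaining, duration)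
--         distances.append((reindeer, distance))
--     return distances
-- ===== Notes on version B (the rewrite author's own statement) =====
-- stated objective: alternative
-- what changed: B replaces A's closed-form full-cycles-plus-clamped-remainder division arithmetic with a division-free subtraction loop that peels off whole fly+rest cycles in doubling power-of-two chunks (Egyptian-division style), then clamps the partial final cycle with min.
-- outside the precondition, e.g. on fly_for(-3, {'R': (2, 1, 1)}): A returns [('R', -2)], B returns [('R', -6)]; on fly_for(5, {'R': (1, 1, -3)}): A returns [('R', -4)], B does not finish within the time limit
import Mathlib
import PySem

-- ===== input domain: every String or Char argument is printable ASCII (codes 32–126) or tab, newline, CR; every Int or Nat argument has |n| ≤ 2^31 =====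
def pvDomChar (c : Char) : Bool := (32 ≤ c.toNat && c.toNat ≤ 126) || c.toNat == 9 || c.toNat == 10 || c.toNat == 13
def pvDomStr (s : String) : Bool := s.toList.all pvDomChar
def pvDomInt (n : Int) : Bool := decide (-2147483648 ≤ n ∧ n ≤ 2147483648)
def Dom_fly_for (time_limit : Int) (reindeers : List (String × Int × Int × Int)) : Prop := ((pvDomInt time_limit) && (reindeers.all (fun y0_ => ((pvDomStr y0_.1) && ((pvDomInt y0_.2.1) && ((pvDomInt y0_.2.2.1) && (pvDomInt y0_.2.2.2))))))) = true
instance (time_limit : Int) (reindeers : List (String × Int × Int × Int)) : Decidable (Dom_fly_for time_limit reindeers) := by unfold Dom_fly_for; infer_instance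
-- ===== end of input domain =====

-- B replaces A's closed-form cycle division with a division-free chunk-doubling subtraction loop;
-- objective: alternative (a genuinely different algorithm, not claimed faster).

-- ===== PORT A =====
def fly_for (time_limit : Int) (reindeers : List (String × Int × Int × Int)) : List (String × Int) :=
  ((PySem.Dict.ofList reindeers).items).foldl
    (fun distances p =>
      let total_time := p.2.2.1 + p.2.2.2
      let full_cycles := PySem.Int.floordiv time_limit total_time
      let distance_in_full_cycles := p.2.1 * p.2.2.1 * full_cycles
      let time_rest := time_limit - full_cycles * total_time
      let time_rest := if time_rest > p.2.2.1 then p.2.2.1 else time_rest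
      let additional_distance := p.2.1 * time_rest
      let total_distance := distance_in_full_cycles + additional_distance
      distances ++ [(p.1, total_distance)]) []

-- ===== PORT B =====
-- inner `while chunk * 2 <= remaining` loop of Source B; the 0 < chunk conjunct is a totality guard only
-- (for chunk ≤ 0 — reachable only outside Pre_ — the Python loop does not terminate)
def growChunk (remaining chunk gain : Int) : Int × Int :=
  if 0 < chunk ∧ chunk * 2 ≤ remaining then growChunk remaining (chunk * 2) (gain * 2)
  else (chunk, gain)
termination_by (remaining - chunk).toNat
decreasing_by omega

-- outer `while remaining >= cycle` loop of Source B, with a fuel parameter as a totality guard only: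
-- flyLoop passes fuel remaining.toNat + 1, which the loop never exhausts when 0 < cycle (each
-- iteration removes at least one whole positive cycle), so inside Pre_ the recursion is exactly
-- Python's `while remaining >= cycle`
def flyLoopF (speed duration cycle : Int) : Nat → Int → Int → Int
  | 0, remaining, distance => distance + speed * (min remaining duration)
  | Nat.succ f, remaining, distance =>
      if cycle ≤ remaining then
        let cg := growChunk remaining cycle (speed * duration)
        flyLoopF speed duration cycle f (remaining - cg.1) (distance + cg.2)
      else
        distance + speed * (min remaining duration)

def flyLoop (speed duration cycle remaining distance : Int) : Int :=
  flyLoopF speed duration cycle (remaining.toNat + 1) remaining distance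

def fly_for_alt (time_limit : Int) (reindeers : List (String × Int × Int × Int)) : List (String × Int) :=
  ((PySem.Dict.ofList reindeers).items).foldl
    (fun distances p =>
      distances ++ [(p.1, flyLoop p.2.1 p.2.2.1 (p.2.2.1 + p.2.2.2) time_limit 0)]) []

-- ===== PRECONDITION & SPEC =====
-- Pre_ restricts to the task's natural domain: a nonnegative time limit and a positive fly+rest cycle for
-- every reindeer. A raises ZeroDivisionError when duration+rest == 0; for a negative time limit or a negative
-- cycle A still returns closed-form values that a time simulation is not meant to match (B's loop returns a
-- different value resp. does not terminate there).
def Pre_fly_for (time_limit : Int) (reindeers : List (String × Int × Int × Int)) : Prop :=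
  0 ≤ time_limit ∧ ∀ p ∈ reindeers, 0 < p.2.2.1 + p.2.2.2
instance (time_limit : Int) (reindeers : List (String × Int × Int × Int)) : Decidable (Pre_fly_for time_limit reindeers) := by unfold Pre_fly_for; infer_instance

def pvWitness_fly_for : Int × (List (String × Int × Int × Int)) :=
  (1000, [("Comet", (14, 10, 127)), ("Dancer", (16, 11, 162))])

def Spec_fly_for (time_limit : Int) (reindeers : List (String × Int × Int × Int)) (out : List (String × Int)) : Prop := out = fly_for_alt time_limit reindeers
instance (time_limit : Int) (reindeers : List (String × Int × Int × Int)) (out : List (String × Int)) : Decidable (Spec_fly_for time_limit reindeers out) := by unfold Spec_fly_for; infer_instance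

-- ===== CLAIM (what is proved, stated in full; the proofs are below) =====
def Claim_equal_fly_for : Prop := ∀ (time_limit : Int) (reindeers : List (String × Int × Int × Int)), Dom_fly_for time_limit reindeers → Pre_fly_for time_limit reindeers → Spec_fly_for time_limit reindeers (fly_for time_limit reindeers)

-- ===== LEMMAS AND PROOFS =====

-- the inner doubling loop returns a positive multiple k of its starting (chunk, gain), still at most `remaining`
lemma growChunk_spec (remaining : Int) : ∀ (n : Nat) (chunk gain : Int), (remaining - chunk).toNat = n →
    0 < chunk → chunk ≤ remaining →
    ∃ k : Int, 1 ≤ k ∧ growChunk remaining chunk gain = (k * chunk, k * gain) ∧ k * chunk ≤ remaining := by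
  intro n
  induction n using Nat.strong_induction_on with
  | _ n ih =>
    intro chunk gain hn hc hcr
    rw [growChunk]
    by_cases h : chunk * 2 ≤ remaining
    · rw [if_pos ⟨hc, h⟩]
      obtain ⟨k, hk, heq, hle⟩ :=
        ih (remaining - chunk * 2).toNat (by omega) (chunk * 2) (gain * 2) rfl (by omega) h
      refine ⟨k * 2, by omega, ?_, ?_⟩
      · rw [heq]
        simp only [Prod.mk.injEq]
        constructor <;> ring
      · calc k * 2 * chunk = k * (chunk * 2) := by ring
          _ ≤ remaining := hle
    · rw [if_neg (by tauto)]
      exact ⟨1, le_refl 1, by simp, by simpa using hcr⟩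

-- every item of a dict built from a list comes from the initial dict or from the list
lemma mem_items_update {κ ν : Type} [BEq κ] [LawfulBEq κ] :
    ∀ (l : List (κ × ν)) (d : PySem.Dict κ ν) (p : κ × ν),
      p ∈ (d.update l).items → p ∈ d.items ∨ p ∈ l := by
  intro l
  induction l with
  | nil => intro d p h; exact Or.inl h
  | cons q t ih =>
    intro d p h
    have h' : p ∈ ((d.insert q.1 q.2).update t).items := h
    rcases ih (d.insert q.1 q.2) p h' with h1 | h1
    · rcases (PySem.Dict.mem_items_insert d q.1 q.2 p).mp h1 with h2 | h2
      · exact Or.inr (by simp [h2])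
      · exact Or.inl h2.1
    · exact Or.inr (List.mem_cons_of_mem _ h1)

-- the chunk-doubling subtraction loop computes A's full-cycles-plus-clamped-remainder value
lemma flyLoopF_eq (speed duration cycle : Int) (hc : 0 < cycle) :
    ∀ (fuel : Nat) (remaining : Int), remaining.toNat < fuel → 0 ≤ remaining → ∀ distance,
      flyLoopF speed duration cycle fuel remaining distance =
        distance + speed * duration * (remaining / cycle)
          + speed * min (remaining - remaining / cycle * cycle) duration := by
  intro fuel
  induction fuel with
  | zero => intro remaining hf; exact absurd hf (by omega)
  | succ f ih =>
    intro remaining hf hr distance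
    rw [flyLoopF]
    by_cases h : cycle ≤ remaining
    · rw [if_pos h]
      obtain ⟨k, hk, heq, hle⟩ :=
        growChunk_spec remaining (remaining - cycle).toNat cycle (speed * duration) rfl hc h
      have hkc : cycle ≤ k * cycle := le_mul_of_one_le_left (le_of_lt hc) hk
      simp only [heq]
      rw [ih (remaining - k * cycle) (by omega) (by omega)]
      have hdiv : (remaining - k * cycle) / cycle = remaining / cycle - k := by
        have := Int.add_mul_ediv_right remaining (-k) (c := cycle) (by omega)
        have harg : remaining + -k * cycle = remaining - k * cycle := by ring
        rw [harg] at this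
        omega
      rw [hdiv]
      have harg : remaining - k * cycle - (remaining / cycle - k) * cycle
          = remaining - remaining / cycle * cycle := by ring
      rw [harg]
      ring
    · rw [if_neg h]
      have hq : remaining / cycle = 0 := Int.ediv_eq_zero_of_lt hr (by omega)
      rw [hq]
      ring_nf

lemma flyLoop_eq (speed duration cycle remaining : Int) (hc : 0 < cycle) (hr : 0 ≤ remaining) :
    flyLoop speed duration cycle remaining 0 =
      speed * duration * (remaining / cycle)
        + speed * min (remaining - remaining / cycle * cycle) duration := by
  have := flyLoopF_eq speed duration cycle hc (remaining.toNat + 1) remaining (by omega) hr 0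
  simpa [flyLoop] using this

-- ===== VERDICT (by name: the statement is the Claim_ definition above) =====
theorem fly_for_spec : Claim_equal_fly_for := by
  intro time_limit reindeers _ hpre
  unfold Spec_fly_for fly_for fly_for_alt
  rw [PySem.List.foldl_append_singleton_eq_map, PySem.List.foldl_append_singleton_eq_map]
  simp only [List.nil_append]
  apply List.map_congr_left
  intro p hp
  have hmem : p ∈ reindeers := by
    rcases mem_items_update reindeers PySem.Dict.empty p hp with h | h
    · simp [PySem.Dict.empty] at h
    · exact h
  have hc : 0 < p.2.2.1 + p.2.2.2 := hpre.2 p hmem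
  have hfd : PySem.Int.floordiv time_limit (p.2.2.1 + p.2.2.2)
      = time_limit / (p.2.2.1 + p.2.2.2) := PySem.Int.floordiv_eq_ediv_of_pos hc
  rw [flyLoop_eq p.2.1 p.2.2.1 (p.2.2.1 + p.2.2.2) time_limit hc hpre.1, hfd]
  refine Prod.ext rfl ?_
  have hmin : (if time_limit - time_limit / (p.2.2.1 + p.2.2.2) * (p.2.2.1 + p.2.2.2) > p.2.2.1
        then p.2.2.1
        else time_limit - time_limit / (p.2.2.1 + p.2.2.2) * (p.2.2.1 + p.2.2.2))
      = min (time_limit - time_limit / (p.2.2.1 + p.2.2.2) * (p.2.2.1 + p.2.2.2)) p.2.2.1 := by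
    rw [min_def]; split_ifs <;> omega
  simp only [hmin]
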